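-- pv_equiv track=rewrite | github.com/reflexsc/reflex | src/rfx/optarg.py | optmatch
-- ===== SOURCE A (Python) =====
-- def optmatch(pattern, match):
--     """
--     Easier argument specs than argparse
--
--     >>> optmatch("l?ist|ls", "lis")
--     True
--     >>> optmatch("l?ist|ls", "ls")
--     True
--     >>> optmatch("l?ist|ls", "l")
--     True
--     >>> optmatch("l?ist|ls", "loo")
--     False
--     """
--     match = str(match).lower().split("=", 1)[0]
--     for variant in pattern.split("|"):
--         req, opt = (variant + "?").split("?")[0:2]
--         if req == match:
--             return True
--         for char in opt:
--             req = req + char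
--             if req == match:
--                 return True
--     return False
-- ===== SOURCE B (Python) =====
-- def optmatch(pattern, match):
--     match = str(match).lower().split("=", 1)[0]
--     accepted = []
--     for variant in pattern.split("|"):
--         req, opt = (variant + "?").split("?")[0:2]
--         for i in range(len(opt) + 1):
--             accepted.append(req + opt[:i])
--     return match in accepted
-- ===== Notes on version B (the rewrite author's own statement) =====
-- stated objective: alternative
-- what changed: A scans variant by variant with an inner loop that extends the required prefix one character at a time and returns early on the first hit; B first materialises the full list of accepted strings (req plus every prefix of opt, for every variant) and then answers with a single membership test.
import Mathlib
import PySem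

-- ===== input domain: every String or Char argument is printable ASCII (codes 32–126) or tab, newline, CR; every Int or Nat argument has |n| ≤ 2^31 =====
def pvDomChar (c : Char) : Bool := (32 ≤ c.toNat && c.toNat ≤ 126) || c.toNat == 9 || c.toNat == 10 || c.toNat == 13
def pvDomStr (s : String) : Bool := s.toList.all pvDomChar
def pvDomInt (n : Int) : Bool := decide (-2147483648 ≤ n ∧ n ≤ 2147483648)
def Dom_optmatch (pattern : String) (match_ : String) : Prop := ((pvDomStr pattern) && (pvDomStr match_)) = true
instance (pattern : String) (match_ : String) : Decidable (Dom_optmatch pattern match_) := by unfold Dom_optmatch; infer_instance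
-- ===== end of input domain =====

-- B replaces A's early-returning scan with an incremental inner prefix-builder by a staged
-- computation: first build the list of all accepted strings, then one membership test
-- (objective: alternative); same return value everywhere.

-- ===== PORT A =====
-- shared line of both Pythons: req, opt = (variant + "?").split("?")[0:2]
-- ('(variant + "?").split("?")' always has >= 2 parts, so the unpacking is ported with headD)
def pvParts (v : List Char) : List Char × List Char :=
  let parts := (PySem.Chars.splitOn (v ++ ['?']) ['?']).take 2
  (parts.headD [], (parts.drop 1).headD [])

-- inner loop: for char in opt: req = req + char; if req == match: return True
def pvInnerA (m req : List Char) : List Char → Bool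
  | [] => false
  | c :: rest =>
    if req ++ [c] = m then true else pvInnerA m (req ++ [c]) rest

-- outer loop over variants with early return
def pvLoopA (m : List Char) : List (List Char) → Bool
  | [] => false
  | v :: vs =>
    if (pvParts v).1 = m then true
    else if pvInnerA m (pvParts v).1 (pvParts v).2 then true
    else pvLoopA m vs

def optmatch (pattern : String) (match_ : String) : Bool :=
  let m := (PySem.Chars.splitOnMax (PySem.Chars.lower match_.toList) ['='] 1).headD []
  pvLoopA m (PySem.Chars.splitOn pattern.toList ['|'])

-- ===== PORT B =====
-- the accepted strings contributed by one variant: req ++ opt[:i] for i in range(len(opt)+1)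
def pvAccepted (v : List Char) : List (List Char) :=
  (List.range ((pvParts v).2.length + 1)).map (fun i => (pvParts v).1 ++ (pvParts v).2.take i)

def optmatch_alt (pattern : String) (match_ : String) : Bool :=
  let m := (PySem.Chars.splitOnMax (PySem.Chars.lower match_.toList) ['='] 1).headD []
  ((PySem.Chars.splitOn pattern.toList ['|']).flatMap pvAccepted).contains m

-- ===== PRECONDITION & SPEC =====
def Spec_optmatch (pattern : String) (match_ : String) (out : Bool) : Prop := out = optmatch_alt pattern match_
instance (pattern : String) (match_ : String) (out : Bool) : Decidable (Spec_optmatch pattern match_ out) := by unfold Spec_optmatch; infer_instance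

-- ===== CLAIM (what is proved, stated in full; the proofs are below) =====
def Claim_equal_optmatch : Prop := ∀ (pattern : String) (match_ : String), Dom_optmatch pattern match_ → Spec_optmatch pattern match_ (optmatch pattern match_)

-- ===== LEMMAS AND PROOFS =====

-- A's inner loop succeeds exactly when m = req plus some nonempty prefix of cs
lemma pvInnerA_iff (m : List Char) : ∀ (cs req : List Char),
    pvInnerA m req cs = true ↔ ∃ k, 0 < k ∧ k ≤ cs.length ∧ req ++ cs.take k = m := by
  intro cs
  induction cs with
  | nil =>
    intro req
    simp only [pvInnerA, List.length_nil]
    constructor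
    · intro h; exact absurd h (by simp)
    · rintro ⟨k, hk0, hkl, -⟩; omega
  | cons c rest ih =>
    intro req
    by_cases hc : req ++ [c] = m
    · simp only [pvInnerA, if_pos hc]
      constructor
      · intro _
        exact ⟨1, Nat.one_pos, by simp, by simpa using hc⟩
      · intro _; trivial
    · rw [show pvInnerA m req (c :: rest) = pvInnerA m (req ++ [c]) rest by
          simp [pvInnerA, hc], ih (req ++ [c])]
      constructor
      · rintro ⟨k, hk0, hkl, hkm⟩
        refine ⟨k + 1, by omega, by simp; omega, ?_⟩
        rw [List.take_succ_cons, List.append_cons]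
        exact hkm
      · rintro ⟨k, hk0, hkl, hkm⟩
        match k, hk0 with
        | 1, _ =>
          exact absurd (by simpa using hkm) hc
        | (n + 2), _ =>
          refine ⟨n + 1, by omega, by simp at hkl ⊢; omega, ?_⟩
          rw [← List.append_cons]
          exact hkm

-- one variant's test is membership in its candidate list
lemma pvCand_iff (m req opt : List Char) :
    (req = m ∨ pvInnerA m req opt = true)
      ↔ m ∈ (List.range (opt.length + 1)).map (fun i => req ++ opt.take i) := by
  simp only [List.mem_map, List.mem_range, pvInnerA_iff]
  constructor
  · rintro (rfl | ⟨k, hk0, hkl, hkm⟩)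
    · exact ⟨0, by omega, by simp⟩
    · exact ⟨k, by omega, hkm⟩
  · rintro ⟨k, hkl, hkm⟩
    match k with
    | 0 => exact Or.inl (by simpa using hkm)
    | k + 1 => exact Or.inr ⟨k + 1, by omega, by omega, hkm⟩

-- A's per-variant early-return step, as a boolean identity
lemma pvStepBool (m req opt : List Char) (b : Bool) :
    (if req = m then true else if pvInnerA m req opt then true else b)
      = (((List.range (opt.length + 1)).map (fun i => req ++ opt.take i)).contains m || b) := by
  by_cases hm : m ∈ (List.range (opt.length + 1)).map (fun i => req ++ opt.take i)
  · have hc : ((List.range (opt.length + 1)).map (fun i => req ++ opt.take i)).contains m = true := by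
      simpa using hm
    rcases (pvCand_iff m req opt).mpr hm with h1 | h2
    · rw [if_pos h1, hc, Bool.true_or]
    · simp only [h2, if_true, hc, Bool.true_or]
      split <;> rfl
  · have hno := (pvCand_iff m req opt).not.mpr hm
    simp only [not_or] at hno
    have hc : ((List.range (opt.length + 1)).map (fun i => req ++ opt.take i)).contains m = false := by
      simpa using hm
    rw [if_neg hno.1, if_neg hno.2, hc, Bool.false_or]

-- the early-return scan equals membership in the flatMapped candidate list
lemma pvLoop_eq_mem (m : List Char) (vs : List (List Char)) :
    pvLoopA m vs = (vs.flatMap pvAccepted).contains m := by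
  induction vs with
  | nil => rfl
  | cons v vs ih =>
    simp only [pvLoopA, pvAccepted, List.flatMap_cons, List.contains_append]
    rw [pvStepBool, ih]

-- ===== VERDICT =====
theorem optmatch_spec : Claim_equal_optmatch := by
  intro p mm _
  unfold Spec_optmatch optmatch optmatch_alt
  exact pvLoop_eq_mem _ _
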